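-- pv_equiv track=rewrite | github.com/alexandrengau/Word2Vec_LLM_Project | hw2_word2vec_alexandre_ngau.py | flatten_dataset_to_list
-- ===== SOURCE A (Python) =====
-- R = 4
--
-- def extract_words_contexts(list_of_ids_of_txt_doc, R=R):
--   w_ids = list_of_ids_of_txt_doc
--   c_plus_ids = []
--   for w in range(len(w_ids)) :
--     c_plus = []
--     for r in range(w-R, w+R+1):
--       if r < 0 :
--         c_plus.append(0)
--       if r >= 0 and r < len(w_ids) and r != w:
--         c_plus.append(w_ids[r])
--       if r >= len(w_ids):
--         c_plus.append(0)
--     c_plus_ids.append(c_plus)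
--   return w_ids, c_plus_ids
--
-- def flatten_dataset_to_list(data_set, R=R):
--   W = []
--   C = []
--   for i in range(len(data_set)):
--     w, c = extract_words_contexts(data_set[i]["review_ids"])
--     W += w
--     C += c
--   return W, C
-- ===== SOURCE B (Python) =====
-- R = 4
--
-- def flatten_dataset_to_list(data_set, R=R):
--     # A calls extract_words_contexts with the module-level default R=4
--     # regardless of this parameter, so the window width here is the constant 4.
--     W = [t for d in data_set for t in d["review_ids"]]
--     C = []
--     for d in data_set:
--         ids = d["review_ids"]
--         padded = [0] * 4 + ids + [0] * 4
--         C += [padded[w:w + 4] + padded[w + 5:w + 9] for w in range(len(ids))]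
--     return W, C
-- ===== Notes on version B (the rewrite author's own statement) =====
-- stated objective: simpler
-- what changed: Each position's context is built by taking two 4-slices of a zero-padded copy of the review (padded[w:w+4] + padded[w+5:w+9]) instead of A's per-position 9-iteration scan with three conditionals, and the words are flattened with a comprehension; like A, the window width is the module constant 4 (A calls extract_words_contexts with its default R, ignoring its own R parameter).
import Mathlib
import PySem

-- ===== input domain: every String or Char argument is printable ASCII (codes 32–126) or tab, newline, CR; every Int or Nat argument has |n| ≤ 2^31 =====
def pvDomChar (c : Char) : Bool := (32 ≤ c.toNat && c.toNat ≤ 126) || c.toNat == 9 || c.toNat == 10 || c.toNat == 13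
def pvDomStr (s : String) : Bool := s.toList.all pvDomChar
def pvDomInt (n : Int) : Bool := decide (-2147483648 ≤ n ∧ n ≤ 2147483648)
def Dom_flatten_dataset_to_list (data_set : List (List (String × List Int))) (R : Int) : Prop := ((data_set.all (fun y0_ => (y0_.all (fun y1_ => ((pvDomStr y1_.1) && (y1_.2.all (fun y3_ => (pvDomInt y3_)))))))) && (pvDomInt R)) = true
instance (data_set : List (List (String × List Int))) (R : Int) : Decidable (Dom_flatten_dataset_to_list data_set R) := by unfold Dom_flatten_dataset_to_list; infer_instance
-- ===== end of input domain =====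

-- B builds each position's context by slicing a zero-padded copy of the review instead of
-- A's 9-iteration conditional scan per position; objective: simpler. Like A, B's window
-- width is the module constant 4 (A calls extract_words_contexts with its default R).


-- ===== PORT A =====
-- module-level constant R = 4
def pyR : Int := 4

def extract_words_contexts (list_of_ids_of_txt_doc : List Int) (R : Int) : List Int × List (List Int) :=
  let w_ids := list_of_ids_of_txt_doc
  let c_plus_ids :=
    (PySem.List.pyRange 0 (w_ids.length : Int) 1).foldl (fun c_plus_ids w =>
      let c_plus :=
        (PySem.List.pyRange (w - R) (w + R + 1) 1).foldl (fun c_plus r =>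
          let c_plus := if r < 0 then c_plus ++ [(0 : Int)] else c_plus
          let c_plus := if 0 ≤ r ∧ r < (w_ids.length : Int) ∧ r ≠ w then
              c_plus ++ [PySem.List.pyGetD w_ids r 0] else c_plus
          if r ≥ (w_ids.length : Int) then c_plus ++ [(0 : Int)] else c_plus) []
      c_plus_ids ++ [c_plus]) []
  (w_ids, c_plus_ids)

-- data_set[i]["review_ids"]; Pre_ guarantees the key is present (Python raises KeyError otherwise)
def flatten_dataset_to_list (data_set : List (List (String × List Int))) (R : Int) : List Int × List (List Int) :=
  (PySem.List.pyRange 0 (data_set.length : Int) 1).foldl (fun WC i =>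
    let wc := extract_words_contexts
      (PySem.Dict.getD (PySem.Dict.mk (PySem.List.pyGetD data_set i [])) "review_ids" []) pyR
    (WC.1 ++ wc.1, WC.2 ++ wc.2)) ([], [])

-- ===== PORT B =====
def pvLookup (d : List (String × List Int)) : List Int :=
  PySem.Dict.getD (PySem.Dict.mk d) "review_ids" []

def pvAltContexts (ids : List Int) : List (List Int) :=
  let padded := List.replicate 4 (0 : Int) ++ ids ++ List.replicate 4 0
  (List.range ids.length).map (fun (w : Nat) =>
    PySem.List.slice padded (some (w : Int)) (some ((w : Int) + 4)) ++
    PySem.List.slice padded (some ((w : Int) + 5)) (some ((w : Int) + 9)))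

def flatten_dataset_to_list_alt (data_set : List (List (String × List Int))) (R : Int) : List Int × List (List Int) :=
  (data_set.flatMap (fun d => pvLookup d),
   data_set.foldl (fun C d => C ++ pvAltContexts (pvLookup d)) [])

-- ===== PRECONDITION & SPEC =====
-- Pre_ excludes exactly the inputs where some review dict lacks the key "review_ids":
-- there Python A raises KeyError (and Python B raises too).
def Pre_flatten_dataset_to_list (data_set : List (List (String × List Int))) (R : Int) : Prop :=
  ∀ d ∈ data_set, (PySem.Dict.mk d).contains "review_ids" = true
instance (data_set : List (List (String × List Int))) (R : Int) : Decidable (Pre_flatten_dataset_to_list data_set R) := by unfold Pre_flatten_dataset_to_list; infer_instance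

def pvWitness_flatten_dataset_to_list : (List (List (String × List Int))) × Int :=
  ([[("review_ids", [1, 2, 3])], [("review_ids", [])]], 4)

def Spec_flatten_dataset_to_list (data_set : List (List (String × List Int))) (R : Int) (out : List Int × List (List Int)) : Prop := out = flatten_dataset_to_list_alt data_set R
instance (data_set : List (List (String × List Int))) (R : Int) (out : List Int × List (List Int)) : Decidable (Spec_flatten_dataset_to_list data_set R out) := by unfold Spec_flatten_dataset_to_list; infer_instance

-- ===== CLAIM (what is proved, stated in full; the proofs are below) =====
def Claim_equal_flatten_dataset_to_list : Prop := ∀ (data_set : List (List (String × List Int))) (R : Int), Dom_flatten_dataset_to_list data_set R → Pre_flatten_dataset_to_list data_set R → Spec_flatten_dataset_to_list data_set R (flatten_dataset_to_list data_set R)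

-- ===== LEMMAS AND PROOFS =====

-- the padded list, element-wise
lemma pv_padded_getD (ids : List Int) (j : Nat) :
    (List.replicate 4 (0 : Int) ++ ids ++ List.replicate 4 0).getD j 0 =
      if 4 ≤ j ∧ j - 4 < ids.length then ids.getD (j - 4) 0 else 0 := by
  simp only [List.getD_eq_getElem?_getD, List.getElem?_append, List.getElem?_replicate]
  split_ifs <;> simp_all <;> omega

-- a 4-wide window of A's per-index emissions equals a 4-slice of the padded list
lemma pv_seg (ids : List Int) (a : Int) (ha : -4 ≤ a) (ha2 : a ≤ (ids.length : Int)) :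
    (PySem.List.pyRange a (a + 4) 1).map
        (fun r => if r < 0 then (0 : Int) else if (ids.length : Int) ≤ r then 0 else ids.getD r.toNat 0)
      = ((List.replicate 4 (0 : Int) ++ ids ++ List.replicate 4 0).drop (a + 4).toNat).take 4 := by
  apply List.ext_getElem
  · simp [PySem.List.length_pyRange_one, List.length_take, List.length_drop]
    omega
  · intro k h1 h2
    rw [List.getElem_map, PySem.List.getElem_pyRange_one]
    rw [List.getElem_take, List.getElem_drop]
    have hlen : (a + 4).toNat + k < (List.replicate 4 (0 : Int) ++ ids ++ List.replicate 4 0).length := by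
      simp at h2 ⊢; omega
    rw [← List.getD_eq_getElem _ 0 hlen, pv_padded_getD]
    have hk : k < 4 := by simp [List.length_take, List.length_drop] at h2; omega
    split_ifs with c1 c2 c3 <;> try omega
    · congr 1; omega

lemma pv_flatMap_singleton {α β : Type} (l : List α) (f : α → List β) (g : α → β)
    (h : ∀ r ∈ l, f r = [g r]) : l.flatMap f = l.map g := by
  induction l with
  | nil => rfl
  | cons x xs ih =>
    simp only [List.flatMap_cons, List.map_cons, h x (by simp),
      ih (fun r hr => h r (by simp [hr]))]
    rfl

-- A's inner loop at position w equals B's two slices of the padded review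
lemma pv_ctx (ids : List Int) (w : Nat) (hw : w < ids.length) :
    (PySem.List.pyRange ((w : Int) - 4) ((w : Int) + 4 + 1) 1).foldl (fun c_plus r =>
        let c_plus := if r < 0 then c_plus ++ [(0 : Int)] else c_plus
        let c_plus := if 0 ≤ r ∧ r < (ids.length : Int) ∧ r ≠ (w : Int) then
            c_plus ++ [PySem.List.pyGetD ids r 0] else c_plus
        if r ≥ (ids.length : Int) then c_plus ++ [(0 : Int)] else c_plus) []
      = PySem.List.slice (List.replicate 4 (0 : Int) ++ ids ++ List.replicate 4 0) (some (w : Int)) (some ((w : Int) + 4)) ++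
        PySem.List.slice (List.replicate 4 (0 : Int) ++ ids ++ List.replicate 4 0) (some ((w : Int) + 5)) (some ((w : Int) + 9)) := by
  set n : Int := (ids.length : Int) with hn
  set h : Int → List Int := fun r =>
    (if r < 0 then [(0 : Int)] else []) ++
    (if 0 ≤ r ∧ r < n ∧ r ≠ (w : Int) then [PySem.List.pyGetD ids r 0] else []) ++
    (if r ≥ n then [(0 : Int)] else []) with hh
  set g : Int → Int := fun r => if r < 0 then (0 : Int) else if n ≤ r then 0 else ids.getD r.toNat 0 with hg
  have hbody : (fun (c_plus : List Int) r =>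
        let c_plus := if r < 0 then c_plus ++ [(0 : Int)] else c_plus
        let c_plus := if 0 ≤ r ∧ r < n ∧ r ≠ (w : Int) then
            c_plus ++ [PySem.List.pyGetD ids r 0] else c_plus
        if r ≥ n then c_plus ++ [(0 : Int)] else c_plus)
      = fun c_plus r => c_plus ++ h r := by
    funext c r
    simp only [hh]
    split_ifs <;> simp
  rw [hbody, PySem.List.foldl_append_eq_flatMap, List.nil_append]
  have hsplit : PySem.List.pyRange ((w : Int) - 4) ((w : Int) + 4 + 1) 1
      = PySem.List.pyRange ((w : Int) - 4) ((w : Int) - 4 + 4) 1 ++ ((w : Int) :: PySem.List.pyRange ((w : Int) + 1) ((w : Int) + 1 + 4) 1) := by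
    rw [show (w : Int) - 4 + 4 = (w : Int) by ring]
    rw [← PySem.List.pyRange_one_cons (by omega)]
    rw [show (w : Int) + 1 + 4 = (w : Int) + 4 + 1 by ring]
    exact PySem.List.pyRange_one_append _ _ _ (by omega) (by omega)
  rw [hsplit, List.flatMap_append, List.flatMap_cons]
  have hgeq : ∀ r : Int, r ≠ (w : Int) → h r = [g r] := by
    intro r hr
    simp only [hh, hg]
    by_cases h1 : r < 0
    · simp [h1, show ¬ (0 ≤ r) by omega, show ¬ (r ≥ n) by omega]
    · by_cases h2 : n ≤ r
      · simp [h1, h2, show ¬ (r < n) by omega, ge_iff_le]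
      · have h0 : 0 ≤ r := by omega
        have := PySem.List.pyGetD_eq_getElem ids (i := r) 0 h0 (by omega)
        simp [h1, h2, h0, hr, show r < n by omega, ge_iff_le, this]
        rw [List.getElem?_eq_getElem (by omega)]
        rfl
  have hw0 : h (w : Int) = [] := by
    simp [hh, show ¬ ((w : Int) < 0) by omega, show ¬ ((w : Int) ≥ n) by omega]
  rw [hw0]
  rw [pv_flatMap_singleton _ h g (fun r hr => hgeq r (by
      rcases PySem.List.mem_pyRange_one.mp hr with ⟨_, hlt⟩; omega))]
  rw [pv_flatMap_singleton _ h g (fun r hr => hgeq r (by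
      rcases PySem.List.mem_pyRange_one.mp hr with ⟨hge, _⟩; omega))]
  rw [hg, pv_seg ids ((w : Int) - 4) (by omega) (by omega),
      pv_seg ids ((w : Int) + 1) (by omega) (by omega)]
  have e1 : PySem.List.slice (List.replicate 4 (0 : Int) ++ ids ++ List.replicate 4 0) (some (w : Int)) (some ((w : Int) + 4))
      = ((List.replicate 4 (0 : Int) ++ ids ++ List.replicate 4 0).drop w).take 4 := by
    have := PySem.List.slice_natCast_add (List.replicate 4 (0 : Int) ++ ids ++ List.replicate 4 0) w 4
    push_cast at this ⊢; exact this
  have e2 : PySem.List.slice (List.replicate 4 (0 : Int) ++ ids ++ List.replicate 4 0) (some ((w : Int) + 5)) (some ((w : Int) + 9))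
      = ((List.replicate 4 (0 : Int) ++ ids ++ List.replicate 4 0).drop (w + 5)).take 4 := by
    have := PySem.List.slice_natCast_add (List.replicate 4 (0 : Int) ++ ids ++ List.replicate 4 0) (w + 5) 4
    push_cast at this ⊢
    rw [show (w : Int) + 9 = (w : Int) + 5 + 4 by ring]
    exact this
  rw [show ((w:Int) - 4 + 4).toNat = w by omega, show ((w:Int) + 1 + 4).toNat = w + 5 by omega, e1, e2]
  simp


-- A's per-review contexts equal B's
lemma pv_review (ids : List Int) :
    (extract_words_contexts ids pyR).2 = pvAltContexts ids := by
  unfold extract_words_contexts pyR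
  simp only []
  rw [PySem.List.foldl_append_singleton_eq_map, List.nil_append,
    PySem.List.pyRange_zero_nat, List.map_map]
  unfold pvAltContexts
  simp only []
  apply List.map_congr_left
  intro w hw
  simp only [Function.comp_apply]
  exact pv_ctx ids w (List.mem_range.mp hw)

-- ===== VERDICT (by name: the statement is the Claim_ definition above) =====
theorem flatten_dataset_to_list_spec : Claim_equal_flatten_dataset_to_list := by
  intro ds R _ _
  show flatten_dataset_to_list ds R = flatten_dataset_to_list_alt ds R
  unfold flatten_dataset_to_list flatten_dataset_to_list_alt
  simp only []
  rw [PySem.List.foldl_pyRange_zero_pyGetD' ds ([] : List (String × List Int))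
      (fun (WC : List Int × List (List Int)) d =>
        (WC.1 ++ (extract_words_contexts (PySem.Dict.getD (PySem.Dict.mk d) "review_ids" []) pyR).1,
         WC.2 ++ (extract_words_contexts (PySem.Dict.getD (PySem.Dict.mk d) "review_ids" []) pyR).2))
      (([], []) : List Int × List (List Int))]
  rw [PySem.List.foldl_prod_mk
      (f := fun (W : List Int) d => W ++ (extract_words_contexts (PySem.Dict.getD (PySem.Dict.mk d) "review_ids" []) pyR).1)
      (g := fun (C : List (List Int)) d => C ++ (extract_words_contexts (PySem.Dict.getD (PySem.Dict.mk d) "review_ids" []) pyR).2)]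
  refine Prod.ext ?_ ?_
  · rw [PySem.List.foldl_append_eq_flatMap
      (fun d => (extract_words_contexts (PySem.Dict.getD (PySem.Dict.mk d) "review_ids" []) pyR).1) ds []]
    rfl
  · simp only [pv_review]
    rfl
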